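-- pv_equiv track=rewrite | github.com/Alvei/Python-examples | Projects/Count/count.py | count_words_basic
-- ===== SOURCE A (Python) =====
-- from typing import Dict
--
-- def count_words_basic(phrase: str) -> Dict[str, int]:
--     """ Enumerate and count words in a phrase.
--         While the setdefault trick is cool not efficient b/c two loops.
--         Does not pass the ¿ test. """
--
--     words = []
--     # Strip the punctuation characters for the list created by .split() method.
--     for word in phrase.lower().split():
--         words.append(word.strip(',;.!?"()'))
--
--     my_dict = {}
--     # check to see if my_dict[key] exist. If not, set to zero, if yes, do nothing.
--     for word in words:
--         my_dict.setdefault(word, 0)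
--         my_dict[word] += 1
--
--     return my_dict
-- ===== SOURCE B (Python) =====
-- def count_words_basic(phrase: str):
--     words = [w.strip(',;.!?"()') for w in phrase.lower().split()]
--     return {w: words.count(w) for w in dict.fromkeys(words)}
-- ===== Notes on version B (the rewrite author's own statement) =====
-- stated objective: simpler
-- what changed: Replaces A's incremental setdefault-and-increment dict fold with a dedup-then-count comprehension: distinct words in first-appearance order, each paired with list.count.
import Mathlib
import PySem

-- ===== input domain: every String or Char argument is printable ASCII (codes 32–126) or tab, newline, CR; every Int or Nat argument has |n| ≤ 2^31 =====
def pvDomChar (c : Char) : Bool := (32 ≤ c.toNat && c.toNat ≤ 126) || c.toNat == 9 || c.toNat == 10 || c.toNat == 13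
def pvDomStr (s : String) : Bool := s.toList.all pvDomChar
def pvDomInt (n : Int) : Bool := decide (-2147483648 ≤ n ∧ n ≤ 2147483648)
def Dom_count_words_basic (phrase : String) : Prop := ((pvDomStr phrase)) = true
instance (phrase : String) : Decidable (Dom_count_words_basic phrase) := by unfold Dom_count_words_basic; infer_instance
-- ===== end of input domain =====

-- B replaces A's setdefault-and-increment dict fold by a dedup-then-count comprehension (same values, same key order).

-- ===== PORT A =====
def count_words_basic (phrase : String) : List (String × Int) :=
  -- words = [word.strip(',;.!?"()') for word in phrase.lower().split()]  (written as A's append loop)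
  let words : List String :=
    (PySem.Str.split₀ (PySem.Str.lower phrase)).foldl
      (fun acc w => acc ++ [PySem.Str.stripChars w ",;.!?\"()"]) []
  -- for word in words: my_dict.setdefault(word, 0); my_dict[word] += 1
  let my_dict : PySem.Dict String Int :=
    words.foldl (fun d w => (d.setdefault w 0).modify w 0 (· + 1)) PySem.Dict.empty
  my_dict.items

-- ===== PORT B =====
def count_words_basic_alt (phrase : String) : List (String × Int) :=
  let words : List String :=
    (PySem.Str.split₀ (PySem.Str.lower phrase)).map
      (fun w => PySem.Str.stripChars w ",;.!?\"()")
  (PySem.List.dedup words).map (fun w => (w, (words.count w : Int)))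

-- ===== PRECONDITION & SPEC =====
def Spec_count_words_basic (phrase : String) (out : List (String × Int)) : Prop := out = count_words_basic_alt phrase
instance (phrase : String) (out : List (String × Int)) : Decidable (Spec_count_words_basic phrase out) := by unfold Spec_count_words_basic; infer_instance

-- ===== CLAIM (what is proved, stated in full; the proofs are below) =====
def Claim_equal_count_words_basic : Prop := ∀ (phrase : String), Dom_count_words_basic phrase → Spec_count_words_basic phrase (count_words_basic phrase)

-- ===== LEMMAS AND PROOFS =====

lemma setdefault_modify {κ : Type} [BEq κ] [LawfulBEq κ] (d : PySem.Dict κ Int) (k : κ) :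
    (d.setdefault k 0).modify k 0 (· + 1) = d.modify k 0 (· + 1) := by
  by_cases h : d.contains k = true
  · rw [PySem.Dict.setdefault_of_contains _ _ h]
  · have h' : d.contains k = false := by simpa using h
    rw [PySem.Dict.setdefault_of_not_contains _ _ h']
    have hnk : ∀ p ∈ d.items, (p.1 == k) = false := by
      have hh := h'
      simp only [PySem.Dict.contains, List.any_eq_false] at hh
      intro p hp; simpa using hh p hp
    have hany : (d.items.any fun p => p.1 == k) = false := by
      simp only [List.any_eq_false]
      intro p hp; simpa using hnk p hp
    have hfind : d.items.find? (fun p => p.1 == k) = none := by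
      rw [List.find?_eq_none]
      intro p hp; simpa using hnk p hp
    have hget : d.get? k = none := by
      simp only [PySem.Dict.get?, hfind, Option.map_none]
    apply PySem.Dict.ext
    simp only [PySem.Dict.modify, PySem.Dict.insert, PySem.Dict.getD, hget,
      PySem.Dict.contains, List.any_append, List.any_cons, List.any_nil,
      beq_self_eq_true, Bool.or_true, Bool.true_or, if_true, hany,
      Option.getD_none, if_false, Bool.false_eq_true]
    simp only [PySem.Dict.get?, List.find?_append, hfind, Option.none_or,
      List.find?_cons, beq_self_eq_true, if_true, Option.map_some, Option.getD_some,
      List.map_append, List.map_cons, List.map_nil]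
    congr 1
    calc List.map (fun p : κ × Int => if (p.1 == k) = true then (k, 0 + 1) else p) d.items
        = List.map id d.items := List.map_congr_left (fun p hp => by simp [hnk p hp])
      _ = d.items := List.map_id _

-- appending one element at a time is List.map
lemma foldl_append_singleton_map {α β : Type} (f : α → β) (xs : List α) (acc : List β) :
    xs.foldl (fun a w => a ++ [f w]) acc = acc ++ xs.map f := by
  induction xs generalizing acc with
  | nil => simp
  | cons x t ih => simp [List.foldl, ih]

-- A's counting loop is Counter(words)
lemma loop_eq_counter (words : List String) :
    words.foldl (fun d w => (d.setdefault w 0).modify w 0 (· + 1)) PySem.Dict.empty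
      = PySem.Dict.counter words := by
  rw [PySem.Dict.counter_eq_foldl]
  induction words using List.reverseRecOn with
  | nil => rfl
  | append_singleton t x ih => simp [List.foldl_append, setdefault_modify]

-- the two programs agree for any token list
lemma ports_agree (ws : List String) :
    ((ws.foldl (fun acc w => acc ++ [PySem.Str.stripChars w ",;.!?\"()"]) []).foldl
        (fun d w => (d.setdefault w 0).modify w 0 (· + 1)) PySem.Dict.empty).items
      = (PySem.List.dedup (ws.map (fun w => PySem.Str.stripChars w ",;.!?\"()"))).map
          (fun w => (w, ((ws.map (fun w => PySem.Str.stripChars w ",;.!?\"()")).count w : Int))) := by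
  rw [foldl_append_singleton_map, List.nil_append, loop_eq_counter,
    PySem.Dict.items_counter, PySem.List.dedup_eq_ofList]

-- ===== VERDICT (by name: the statement is the Claim_ definition above) =====
theorem count_words_basic_spec : Claim_equal_count_words_basic := by
  intro phrase _
  exact ports_agree (PySem.Str.split₀ (PySem.Str.lower phrase))
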